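-- pv_equiv track=rewrite | github.com/masakatsuSan/pythonassistance | PRACTICE FOR OPPE/section1/question.py | courses_sorted_by_enrollment
-- ===== SOURCE A (Python) =====
-- def courses_sorted_by_enrollment(student_courses: dict) -> list:
--     sub_count = {}
--     for lst in student_courses.values():
--         for i in lst:
--             if i in sub_count :
--                 sub_count[i] += 1
--             else :
--                 sub_count[i] = 1
--     sub_countlst = sub_count.items()
--     sorted_count = sorted(sub_countlst,key= lambda x:x[1],reverse=True)
--     res = []
--     for i in sorted_count:
--         res.append(i[0])
--     return res
-- ===== SOURCE B (Python) =====
-- def courses_sorted_by_enrollment(student_courses: dict) -> list: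
--     counts = {}
--     for lst in student_courses.values():
--         for c in lst:
--             counts[c] = counts.get(c, 0) + 1
--     if not counts:
--         return []
--     buckets = {}
--     for course, n in counts.items():
--         buckets.setdefault(n, []).append(course)
--     res = []
--     for v in range(max(counts.values()), 0, -1):
--         res.extend(buckets.get(v, []))
--     return res
-- ===== Notes on version B (the rewrite author's own statement) =====
-- stated objective: alternative
-- what changed: Replaces the stable comparison sort of (course,count) items by a bucket (counting) sort: one pass over the count dict drops each course into a bucket keyed by its count, then buckets are emitted for count values from the maximum down to 1, preserving first-seen order within a bucket.
import Mathlib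
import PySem

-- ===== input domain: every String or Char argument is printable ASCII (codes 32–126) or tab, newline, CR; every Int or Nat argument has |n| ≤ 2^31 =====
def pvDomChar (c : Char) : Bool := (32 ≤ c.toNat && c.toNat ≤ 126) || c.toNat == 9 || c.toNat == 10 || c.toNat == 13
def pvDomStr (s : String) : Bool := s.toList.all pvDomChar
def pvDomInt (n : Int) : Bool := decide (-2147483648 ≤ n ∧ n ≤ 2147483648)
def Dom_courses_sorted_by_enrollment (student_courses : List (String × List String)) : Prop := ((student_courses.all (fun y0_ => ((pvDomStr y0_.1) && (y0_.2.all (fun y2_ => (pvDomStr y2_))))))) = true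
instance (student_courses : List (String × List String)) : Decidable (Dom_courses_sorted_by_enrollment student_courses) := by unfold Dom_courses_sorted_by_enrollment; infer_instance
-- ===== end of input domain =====

-- B replaces A's stable comparison sort by a counting-sort sweep over count values from the maximum down to 1 (objective: alternative algorithm of similar cost).

-- ===== PORT A =====
def courses_sorted_by_enrollment (student_courses : List (String × List String)) : List String :=
  let sub_count : PySem.Dict String Int :=
    student_courses.foldl (fun d p =>
      p.2.foldl (fun d i =>
        if d.contains i then d.modify i 0 (· + 1) else d.insert i 1) d) PySem.Dict.empty
  let sub_countlst := sub_count.items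
  let sorted_count := PySem.List.sorted sub_countlst (fun x => x.2) true
  sorted_count.foldl (fun res i => res ++ [i.1]) []

-- ===== PORT B =====
def courses_sorted_by_enrollment_alt (student_courses : List (String × List String)) : List String :=
  let counts : PySem.Dict String Int :=
    student_courses.foldl (fun d p =>
      p.2.foldl (fun d c => d.insert c (d.getD c 0 + 1)) d) PySem.Dict.empty
  if counts.items = [] then []
  else
    -- 'buckets.setdefault(n, []).append(course)' mutates the bucket in place; ported
    -- value-exactly as d[n] = d.get(n, []) ++ [course], i.e. PySem.Dict.modify.
    let buckets : PySem.Dict Int (List String) :=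
      counts.items.foldl (fun d p => d.modify p.2 [] (· ++ [p.1])) PySem.Dict.empty
    match PySem.List.max? counts.values (fun v => v) with
    | none => []
    | some top =>
      (PySem.List.pyRange top 0 (-1)).foldl (fun res v => res ++ buckets.getD v []) []

-- ===== PRECONDITION & SPEC =====
def Spec_courses_sorted_by_enrollment (student_courses : List (String × List String)) (out : List String) : Prop := out = courses_sorted_by_enrollment_alt student_courses
instance (student_courses : List (String × List String)) (out : List String) : Decidable (Spec_courses_sorted_by_enrollment student_courses out) := by unfold Spec_courses_sorted_by_enrollment; infer_instance

-- ===== CLAIM (what is proved, stated in full; the proofs are below) =====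
def Claim_equal_courses_sorted_by_enrollment : Prop := ∀ (student_courses : List (String × List String)), Dom_courses_sorted_by_enrollment student_courses → Spec_courses_sorted_by_enrollment student_courses (courses_sorted_by_enrollment student_courses)

-- ===== LEMMAS AND PROOFS =====

-- Nested loop over the values lists is the loop over the flattened course list.
lemma foldl_foldl_eq_foldl_flatMap {α β : Type} (l : List (α × List β)) {γ : Type}
    (g : γ → β → γ) (init : γ) :
    l.foldl (fun d p => p.2.foldl g d) init = (l.flatMap (fun p => p.2)).foldl g init := by
  induction l generalizing init with
  | nil => rfl
  | cons a t ih => simp [List.flatMap_cons, List.foldl_append, ih]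

-- A's counting step is B's counting step, which is the Counter step.
lemma stepA_eq_counter_step (d : PySem.Dict String Int) (i : String) :
    (if d.contains i then d.modify i 0 (· + 1) else d.insert i 1) = d.modify i 0 (· + 1) := by
  by_cases h : d.contains i = true
  · simp [h]
  · simp only [Bool.not_eq_true] at h
    simp [h, PySem.Dict.modify, PySem.Dict.getD_of_not_contains d (0 : Int) h]

lemma insertBy_append_not_before {α : Type} (before : α → α → Bool) (x : α) (g r : List α)
    (hg : ∀ y ∈ g, before x y = false) :
    PySem.List.insertBy before x (g ++ r) = g ++ PySem.List.insertBy before x r := by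
  induction g with
  | nil => rfl
  | cons a t ih =>
      have ha : before x a = false := hg a (by simp)
      simp only [List.cons_append, PySem.List.insertBy, ha]
      simp [ih (fun y hy => hg y (by simp [hy]))]

lemma insertBy_all_before {α : Type} (before : α → α → Bool) (x : α) (r : List α)
    (hr : ∀ y ∈ r, before x y = true) :
    PySem.List.insertBy before x r = x :: r := by
  cases r with
  | nil => rfl
  | cons a t => simp [PySem.List.insertBy, hr a (by simp)]

-- Inserting x into the descending-group concatenation appends x to its own group.
lemma insertBy_flatMap_groups (x : String × Int) (l : List (String × Int)) (vs : List Int)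
    (hvs : vs.Pairwise (fun a b => b < a)) (hx : x.2 ∈ vs) :
    PySem.List.insertBy (fun a b => decide (b.2 < a.2)) x
      (vs.flatMap (fun v => l.filter (fun p => p.2 == v))) =
    vs.flatMap (fun v => (l ++ [x]).filter (fun p => p.2 == v)) := by
  induction vs with
  | nil => cases hx
  | cons v vs' ih =>
      have hlt : ∀ w ∈ vs', w < v := by
        intro w hw; exact (List.pairwise_cons.mp hvs).1 w hw
      simp only [List.flatMap_cons, List.filter_append]
      by_cases hxv : x.2 = v
      · have hgrp : ∀ y ∈ l.filter (fun p => p.2 == v),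
            (fun a b => decide (b.2 < a.2)) x y = false := by
          intro y hy
          have : y.2 = v := by simpa using (List.mem_filter.mp hy).2
          simp [this, hxv]
        have hrest : ∀ y ∈ vs'.flatMap (fun v => l.filter (fun p => p.2 == v)),
            (fun a b => decide (b.2 < a.2)) x y = true := by
          intro y hy
          rcases List.mem_flatMap.mp hy with ⟨w, hw, hyf⟩
          have hy2 : y.2 = w := by simpa using (List.mem_filter.mp hyf).2
          simp [hy2, hxv]
          exact hlt w hw
        rw [insertBy_append_not_before _ _ _ _ hgrp, insertBy_all_before _ _ _ hrest]
        have hnotmem : ∀ w ∈ vs', ¬ (x.2 = w) := by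
          intro w hw h; rw [hxv] at h; exact absurd (h ▸ hlt w hw) (lt_irrefl v)
        have : vs'.flatMap (fun v => l.filter (fun p => p.2 == v) ++ List.filter (fun p => p.2 == v) [x])
            = vs'.flatMap (fun v => l.filter (fun p => p.2 == v)) := by
          apply List.flatMap_congr  -- may not exist; fallback below
          intro w hw
          have hfw : (x.2 == w) = false := by simpa using hnotmem w hw
          simp [List.filter, hfw]
        rw [this]
        simp [List.filter, hxv]
      · have hxvs' : x.2 ∈ vs' := by
          rcases List.mem_cons.mp hx with h | h
          · exact absurd h hxv
          · exact h
        have hgrp : ∀ y ∈ l.filter (fun p => p.2 == v),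
            (fun a b => decide (b.2 < a.2)) x y = false := by
          intro y hy
          have hy2 : y.2 = v := by simpa using (List.mem_filter.mp hy).2
          have hxlt : x.2 < v := hlt _ hxvs'
          simp only [hy2, decide_eq_false_iff_not]
          omega
        rw [insertBy_append_not_before _ _ _ _ hgrp,
          ih (List.Pairwise.sublist (List.sublist_cons_self v vs') hvs) hxvs']
        have hfv : (x.2 == v) = false := by simpa using hxv
        simp [List.filter, hfv]

-- Python's stable reverse sort by the count equals the concatenation of the
-- equal-count groups taken along any strictly descending value list covering all counts.
lemma sorted_rev_eq_flatMap_groups (l : List (String × Int)) (vs : List Int)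
    (hvs : vs.Pairwise (fun a b => b < a)) (hl : ∀ p ∈ l, p.2 ∈ vs) :
    PySem.List.sorted l (fun p => p.2) true =
      vs.flatMap (fun v => l.filter (fun p => p.2 == v)) := by
  induction l using List.reverseRecOn with
  | nil => simp [PySem.List.sorted_rev_eq_foldl_insertBy]
  | append_singleton l' x ih =>
      rw [PySem.List.sorted_rev_eq_foldl_insertBy, List.foldl_append,
        ← PySem.List.sorted_rev_eq_foldl_insertBy, ih (fun p hp => hl p (by simp [hp]))]
      simp only [List.foldl_cons, List.foldl_nil]
      exact insertBy_flatMap_groups x l' vs hvs (hl x (by simp))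

-- membership in range(top, 0, -1)
lemma mem_pyRange_top_down (top x : Int) (h1 : 1 ≤ x) (h2 : x ≤ top) :
    x ∈ PySem.List.pyRange top 0 (-1) := by
  rw [PySem.List.pyRange_neg_one]
  refine List.mem_map.mpr ⟨(top - x).toNat, List.mem_range.mpr (by omega), by omega⟩

lemma pairwise_pyRange_top_down (top : Int) :
    (PySem.List.pyRange top 0 (-1)).Pairwise (fun a b => b < a) := by
  rw [PySem.List.pyRange_neg_one]
  refine List.Pairwise.map _ (fun a b h => ?_) (List.pairwise_lt_range)
  omega

-- ===== VERDICT (by name: the statement is the Claim_ definition above) =====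
theorem courses_sorted_by_enrollment_spec : Claim_equal_courses_sorted_by_enrollment := by
  intro sc _
  unfold Spec_courses_sorted_by_enrollment
  simp only [courses_sorted_by_enrollment, courses_sorted_by_enrollment_alt]
  rw [foldl_foldl_eq_foldl_flatMap, foldl_foldl_eq_foldl_flatMap]
  set all := sc.flatMap (fun p => p.2) with hall
  have hstepA : all.foldl (fun d i =>
      if d.contains i then d.modify i 0 (· + 1) else d.insert i 1) PySem.Dict.empty
      = PySem.Dict.counter all := by
    rw [PySem.List.foldl_congr_mem all _
      (fun (d : PySem.Dict String Int) i => d.modify i 0 (· + 1)) _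
      (fun acc x _ => stepA_eq_counter_step acc x)]
    exact (PySem.Dict.counter_eq_foldl all).symm
  have hstepB : all.foldl (fun d c => d.insert c (d.getD c 0 + 1)) PySem.Dict.empty
      = PySem.Dict.counter all := PySem.Dict.foldl_insert_getD_add_one_eq_counter all
  rw [hstepA, hstepB]
  rw [PySem.List.foldl_append_singleton_eq_map]
  simp only [List.nil_append]
  by_cases hemp : (PySem.Dict.counter all).items = []
  · rw [if_pos hemp, hemp]
    rfl
  · rw [if_neg hemp]
    have hvals : (PySem.Dict.counter all).values ≠ [] := by
      simp only [PySem.Dict.values]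
      simpa using hemp
    obtain ⟨top, htop⟩ : ∃ t, PySem.List.max? (PySem.Dict.counter all).values (fun v => v) = some t := by
      cases h : PySem.List.max? (PySem.Dict.counter all).values (fun v => v) with
      | none => exact absurd (Iff.mp (PySem.List.max?_eq_none_iff _ _) h) hvals
      | some t => exact ⟨t, rfl⟩
    simp only [htop]
    have hbuck : ∀ v : Int,
        ((PySem.Dict.counter all).items.foldl
          (fun (d : PySem.Dict Int (List String)) p => d.modify p.2 [] (· ++ [p.1]))
          PySem.Dict.empty).getD v []
        = ((PySem.Dict.counter all).items.filter (fun p => p.2 == v)).map (fun p => p.1) := by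
      intro v
      have hswap : (PySem.Dict.counter all).items.foldl
          (fun (d : PySem.Dict Int (List String)) p => d.modify p.2 [] (· ++ [p.1]))
          PySem.Dict.empty
          = List.foldl (fun d p => d.modify p.1 [] fun x => x ++ [p.2]) PySem.Dict.empty
              ((PySem.Dict.counter all).items.map (fun p => (p.2, p.1))) := by
        rw [List.foldl_map]
      rw [hswap, PySem.Dict.getD_foldl_modify_append, List.filter_map]
      simp [Function.comp_def, List.map_map, PySem.Dict.getD_empty]
    rw [PySem.List.foldl_append_eq_flatMap]
    simp only [List.nil_append]
    have hmem : ∀ p ∈ (PySem.Dict.counter all).items, p.2 ∈ PySem.List.pyRange top 0 (-1) := by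
      intro p hp
      have hple : p.2 ≤ top := by
        refine PySem.List.max?_isMax htop p.2 ?_
        simp only [PySem.Dict.values]
        exact List.mem_map.mpr ⟨p, hp, rfl⟩
      have hp1 : 1 ≤ p.2 := by
        rw [PySem.Dict.items_counter] at hp
        rcases List.mem_map.mp hp with ⟨k, hk, hpk⟩
        have hkall : k ∈ all := (PySem.Set.mem_ofList _ _).mp hk
        have : 0 < all.count k := List.count_pos_iff.mpr hkall
        rw [← hpk]
        simpa using this
      exact mem_pyRange_top_down top p.2 hp1 hple
    rw [sorted_rev_eq_flatMap_groups _ _ (pairwise_pyRange_top_down top) hmem]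
    rw [List.map_flatMap]
    exact List.flatMap_congr (fun v _ => (hbuck v).symm)
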